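-- pv_equiv track=rewrite | github.com/cathyjiao/sprague-grundy-chomp | sgchomp.py | get_mex
-- ===== SOURCE A (Python) =====
-- def get_mex(numbers):
--     """
--     Find minimal excluded value from a list of numbers.
--
--     :param numbers: list of int
--     :return: (int) mex value
--     """
--
--     # sort the numbers in ascending order
--     numbers.sort()
--
--     if numbers[0] > 0:
--         return 0
--     else:
--         # find gap in the numbers
--         for i, v in enumerate(numbers[:-1]):
--             v_next = numbers[i + 1]
--             if v + 1 != v_next:
--                 return v + 1
--
--         # return 1 + last number in list
--         return numbers[-1] + 1
-- ===== SOURCE B (Python) =====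
-- def get_mex(numbers):
--     """
--     Find minimal excluded value from a list of numbers.
--
--     :param numbers: list of int
--     :return: (int) mex value
--     """
--     present = set(numbers)
--     x = min(present)
--     if x > 0:
--         return 0
--     while x + 1 in present:
--         x += 1
--     return x + 1
-- ===== Notes on version B (the rewrite author's own statement) =====
-- stated objective: simpler
-- what changed: A sorts the list and scans adjacent pairs for the first non-consecutive pair; B builds a set in one pass and walks upward from the minimum while the successor is present (no sort, duplicates ignored).
-- intended difference: On lists whose minimum is <= 0 that contain a duplicated value v with the whole consecutive run from the minimum through v+1 present, A's adjacent-pair scan breaks at the duplicate and returns v+1 even though v+1 is in the list, while B returns the first value actually missing above the minimum, which is the intended mex-style result (multiplicity is irrelevant to a minimal excluded value). — e.g. on get_mex([0, 0, 1]): A returns 1, B returns 2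
import Mathlib
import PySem

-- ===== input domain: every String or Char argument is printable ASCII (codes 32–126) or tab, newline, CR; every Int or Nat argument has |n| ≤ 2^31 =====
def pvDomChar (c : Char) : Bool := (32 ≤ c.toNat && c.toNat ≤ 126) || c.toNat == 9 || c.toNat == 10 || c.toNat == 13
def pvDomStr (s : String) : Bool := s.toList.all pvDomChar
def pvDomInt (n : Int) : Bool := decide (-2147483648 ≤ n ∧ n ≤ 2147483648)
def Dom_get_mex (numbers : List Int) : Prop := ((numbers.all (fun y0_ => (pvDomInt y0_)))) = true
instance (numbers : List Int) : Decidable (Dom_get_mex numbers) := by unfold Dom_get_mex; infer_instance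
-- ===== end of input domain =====

-- B replaces A's sort-then-adjacent-pair scan by a set and a walk from the minimum (objective: simpler);
-- on the D_ inputs below B intentionally ignores duplicates where A breaks at them.
-- A sorts its argument IN PLACE (observable mutation); B does not mutate. The claims are about the return value only.

-- ===== PORT A =====
-- the 'for i, v in enumerate(numbers[:-1]): v_next = numbers[i+1]; …' loop over adjacent pairs,
-- with the final 'return numbers[-1] + 1' as the one-element base case ([] is unreachable: Pre_ gives s ≠ [])
def pvScanA : List Int → Int
  | [] => 0
  | [v] => v + 1
  | v :: w :: rest => if v + 1 ≠ w then v + 1 else pvScanA (w :: rest)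

def get_mex (numbers : List Int) : Int :=
  let s := PySem.List.sorted numbers (fun x => x) false   -- numbers.sort()
  match s with
  | [] => 0                                               -- numbers[0] raises IndexError here; excluded by Pre_
  | v0 :: _ => if v0 > 0 then 0 else pvScanA s

-- ===== PORT B =====
-- the 'while x + 1 in present: x += 1' loop; fuel = number of distinct elements, an upper bound
-- on the iterations (each step moves to another element of the set), so the fuel-out branch is unreachable
def pvWalkB (present : PySem.Set Int) : Int → Nat → Int
  | x, 0 => x + 1
  | x, fuel + 1 => if present.contains (x + 1) then pvWalkB present (x + 1) fuel else x + 1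

def get_mex_alt (numbers : List Int) : Int :=
  let present := PySem.Set.ofList numbers                 -- present = set(numbers)
  match PySem.List.min? present (fun k => k) with         -- x = min(present)
  | none => 0                                             -- min(set()) raises ValueError here; excluded by Pre_
  | some x => if x > 0 then 0 else pvWalkB present x present.length

-- ===== PRECONDITION & SPEC =====
-- A raises IndexError (and B ValueError) on the empty list; nothing else is excluded.
def Pre_get_mex (numbers : List Int) : Prop := numbers ≠ []
instance (numbers : List Int) : Decidable (Pre_get_mex numbers) := by unfold Pre_get_mex; infer_instance
def pvWitness_get_mex : List Int := [0, 2, 0, 1]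

-- On lists whose minimum is ≤ 0 that contain a duplicated value v with the whole consecutive run up to
-- v+1 present, A's adjacent-pair scan breaks at the duplicate and returns v+1 even though v+1 is in the
-- list; B returns the first value actually missing above the minimum, the intended mex-style result
-- (multiplicity is irrelevant to a minimal excluded value).
def D_get_mex (numbers : List Int) : Prop :=
  (∃ m ∈ numbers, m ≤ 0) ∧
  ∃ v ∈ numbers, 2 ≤ numbers.count v ∧ (v + 1) ∈ numbers ∧
    ∀ k ∈ numbers, k < v → (k + 1) ∈ numbers
instance (numbers : List Int) : Decidable (D_get_mex numbers) := by unfold D_get_mex; infer_instance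

def Spec_get_mex (numbers : List Int) (out : Int) : Prop := ¬ D_get_mex numbers → out = get_mex_alt numbers
instance (numbers : List Int) (out : Int) : Decidable (Spec_get_mex numbers out) := by unfold Spec_get_mex; infer_instance

def pvDiffWitness_get_mex : List Int := [0, 0, 1]
def pvDiffWitnessOut_get_mex : Int × Int := (1, 2)

-- ===== CLAIM (what is proved, stated in full; the proofs are below) =====
def Claim_unchanged_get_mex : Prop := ∀ (numbers : List Int), Dom_get_mex numbers → Pre_get_mex numbers → Spec_get_mex numbers (get_mex numbers)
def Claim_changed_get_mex : Prop := Dom_get_mex (pvDiffWitness_get_mex) ∧ Pre_get_mex (pvDiffWitness_get_mex) ∧ D_get_mex (pvDiffWitness_get_mex) ∧ get_mex (pvDiffWitness_get_mex) = pvDiffWitnessOut_get_mex.1 ∧ get_mex_alt (pvDiffWitness_get_mex) = pvDiffWitnessOut_get_mex.2 ∧ pvDiffWitnessOut_get_mex.1 ≠ pvDiffWitnessOut_get_mex.2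

def Claim_exact_get_mex : Prop := ∀ (numbers : List Int), Dom_get_mex numbers → Pre_get_mex numbers → D_get_mex numbers → get_mex numbers ≠ get_mex_alt numbers

-- ===== LEMMAS AND PROOFS =====

-- dedup length of a cons with fresh head
theorem pvDedup_cons_length (v : Int) (t : List Int) (h : v ∉ t) :
    (PySem.List.dedup (v :: t)).length = (PySem.List.dedup t).length + 1 := by
  have hperm : (PySem.List.dedup (v :: t)).Perm (v :: PySem.List.dedup t) := by
    refine (List.perm_ext_iff_of_nodup (PySem.List.nodup_dedup _) ?_).mpr ?_
    · exact List.nodup_cons.mpr ⟨fun hc => h ((PySem.List.mem_dedup t v).mp hc), PySem.List.nodup_dedup t⟩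
    · intro a
      simp [List.mem_cons]
  simpa using hperm.length_eq

-- B's walk agrees with A's adjacent-pair scan on a sorted suffix, given ¬D_ and the stated invariants
theorem pvWalk_eq_scan (L : List Int) (present : PySem.Set Int)
    (hmem : ∀ k, present.contains k = true ↔ k ∈ L)
    (hm0 : ∃ m ∈ L, m ≤ 0)
    (hnD : ¬ D_get_mex L) :
    ∀ (t : List Int) (v : Int) (fuel : Nat),
    (v :: t).Pairwise (· ≤ ·) →
    (∀ k, (v :: t).count k ≤ L.count k) →
    (∀ k ∈ L, k ∈ v :: t ∨ k ≤ v) →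
    (∀ k ∈ L, k < v → (k + 1) ∈ L) →
    (PySem.List.dedup (v :: t)).length ≤ fuel + 1 →
    pvWalkB present v fuel = pvScanA (v :: t) := by
  intro t
  induction t with
  | nil =>
    intro v fuel _ _ htri _ _
    have hm : (v + 1) ∉ present := by
      intro hb
      have h1 : (v + 1) ∈ L := (hmem _).mp ((PySem.Set.contains_iff _ _).mpr hb)
      rcases htri _ h1 with h | h
      · rw [List.mem_singleton] at h; omega
      · omega
    cases fuel with
    | zero => simp [pvWalkB, pvScanA]
    | succ f => simp [pvWalkB, pvScanA, PySem.Set.contains, hm]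
  | cons w rest ih =>
    intro v fuel hpw hcnt htri hcont hfuel
    have hvw : v ≤ w := (List.pairwise_cons.mp hpw).1 w (by simp)
    have htail : ∀ y ∈ w :: rest, w ≤ y := by
      intro y hy
      rcases List.mem_cons.mp hy with h | h
      · omega
      · exact List.rel_of_pairwise_cons (List.pairwise_cons.mp hpw).2 h
    by_cases hw : w = v
    · -- duplicate: A breaks; ¬D_ forces v+1 ∉ L, so B stops too, both return v + 1
      subst hw
      have hc2 : 2 ≤ L.count w := by
        have := hcnt w
        simp at this
        omega
      have hwL : w ∈ L := List.count_pos_iff.mp (by omega)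
      have hm : (w + 1) ∉ present := by
        intro hb
        exact hnD ⟨hm0, w, hwL, hc2, (hmem _).mp ((PySem.Set.contains_iff _ _).mpr hb), hcont⟩
      cases fuel with
      | zero => simp [pvWalkB, pvScanA]
      | succ f => simp [pvWalkB, pvScanA, PySem.Set.contains, hm]
    · have hvltw : v < w := lt_of_le_of_ne hvw (fun h => hw h.symm)
      by_cases hw1 : w = v + 1
      · -- consecutive step: both advance
        have hwL : w ∈ L := by
          have := hcnt w
          have hwmem : (0 : Nat) < (v :: w :: rest).count w := by
            simp [List.count_cons]
          exact List.count_pos_iff.mp (by omega)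
        have hm : (v + 1) ∈ present := (PySem.Set.contains_iff _ _).mp ((hmem _).mpr (hw1 ▸ hwL))
        have hvnot : v ∉ w :: rest := fun hv => absurd (htail v hv) (by omega)
        have hlen : (PySem.List.dedup (v :: w :: rest)).length =
            (PySem.List.dedup (w :: rest)).length + 1 := pvDedup_cons_length v _ hvnot
        have hne : PySem.List.dedup (w :: rest) ≠ [] := by
          intro h
          have : w ∈ PySem.List.dedup (w :: rest) := (PySem.List.mem_dedup _ w).mpr (by simp)
          rw [h] at this
          simp at this
        have hpos : 1 ≤ (PySem.List.dedup (w :: rest)).length := List.length_pos_iff.mpr hne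
        cases fuel with
        | zero => omega
        | succ f =>
          have hstep : pvWalkB present v (f + 1) = pvWalkB present (v + 1) f := by
            simp [pvWalkB, PySem.Set.contains, hm]
          have hscan : pvScanA (v :: w :: rest) = pvScanA (w :: rest) := by
            simp [pvScanA, hw1]
          rw [hstep, hscan, ← hw1]
          refine ih w f (List.pairwise_cons.mp hpw).2 ?_ ?_ ?_ (by omega)
          · intro k
            have := hcnt k
            simp [List.count_cons] at this ⊢
            omega
          · intro k hk
            rcases htri k hk with h | h
            · rcases List.mem_cons.mp h with h | h
              · right; omega
              · left; exact h
            · right; omega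
          · intro k hk hklt
            by_cases hkv : k = v
            · subst hkv; exact hw1 ▸ hwL
            · exact hcont k hk (by omega)
      · -- gap: v + 1 is in neither the suffix nor the processed prefix, both return v + 1
        have hm : (v + 1) ∉ present := by
          intro hb
          have h1 : (v + 1) ∈ L := (hmem _).mp ((PySem.Set.contains_iff _ _).mpr hb)
          rcases htri _ h1 with h | h
          · rcases List.mem_cons.mp h with h | h
            · omega
            · have := htail _ h; omega
          · omega
        have hscan : pvScanA (v :: w :: rest) = v + 1 := by
          simp [pvScanA]; omega
        cases fuel with
        | zero => simp [pvWalkB, hscan]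
        | succ f => simp [pvWalkB, PySem.Set.contains, hm, hscan]

-- B's walk never returns less than start + 1
theorem pvWalk_ge (present : PySem.Set Int) : ∀ (fuel : Nat) (x : Int), x + 1 ≤ pvWalkB present x fuel := by
  intro fuel
  induction fuel with
  | zero => intro x; simp [pvWalkB]
  | succ f ih =>
    intro x
    by_cases h : (x + 1) ∈ present
    · have := ih (x + 1)
      simp [pvWalkB, PySem.Set.contains, h]
      omega
    · simp [pvWalkB, PySem.Set.contains, h]

-- a nodup list with two distinct members has length ≥ 2
theorem pvTwo_le_length (l : List Int) (a b : Int) (ha : a ∈ l) (hb : b ∈ l) (hab : a ≠ b) :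
    2 ≤ l.length := by
  match l with
  | [] => simp at ha
  | [c] =>
    rw [List.mem_singleton] at ha hb
    exact absurd (ha.trans hb.symm) hab
  | _ :: _ :: _ => simp

-- under D_, A's adjacent-pair scan breaks strictly below B's walk on the sorted suffix
theorem pvScan_lt_walk (L : List Int) (present : PySem.Set Int)
    (hmem : ∀ k, present.contains k = true ↔ k ∈ L)
    (v : Int) (hc2 : 2 ≤ L.count v) (hsucc : (v + 1) ∈ L)
    (hcontig : ∀ k ∈ L, k < v → (k + 1) ∈ L) :
    ∀ (t : List Int) (x : Int) (fuel : Nat),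
    (x :: t).Pairwise (· ≤ ·) →
    (∀ k, x ≤ k → (x :: t).count k = L.count k) →
    (∀ k ∈ L, k ∈ x :: t ∨ k < x) →
    (∀ k, k < x → L.count k ≤ 1) →
    (PySem.List.dedup (x :: t)).length ≤ fuel + 1 →
    pvScanA (x :: t) < pvWalkB present x fuel := by
  intro t
  induction t with
  | nil =>
    intro x fuel _ hex htri hun _
    exfalso
    have hcx : L.count x = 1 := by
      have := hex x le_rfl
      simp at this
      omega
    have hxv : x < v := by
      rcases lt_trichotomy v x with h | h | h
      · exact absurd hc2 (by have := hun v h; omega)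
      · exfalso; rw [h] at hc2; omega
      · exact h
    have hxL : x ∈ L := List.count_pos_iff.mp (by omega)
    have h1 : (x + 1) ∈ L := hcontig x hxL hxv
    rcases htri _ h1 with h | h
    · rw [List.mem_singleton] at h; omega
    · omega
  | cons w rest ih =>
    intro x fuel hpw hex htri hun hfuel
    have htail : ∀ y ∈ w :: rest, w ≤ y := by
      intro y hy
      rcases List.mem_cons.mp hy with h | h
      · omega
      · exact List.rel_of_pairwise_cons (List.pairwise_cons.mp hpw).2 h
    have hxw : x ≤ w := (List.pairwise_cons.mp hpw).1 w (by simp)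
    by_cases hw : w = x
    · -- duplicate at x: A returns x + 1, B walks past it
      subst hw
      have hcx : 2 ≤ L.count w := by
        have := hex w le_rfl
        simp at this
        omega
      have hwv : w ≤ v := by
        by_contra h
        have := hun v (by omega)
        omega
      have hwL : w ∈ L := List.count_pos_iff.mp (by omega)
      have h1 : (w + 1) ∈ L := by
        rcases eq_or_lt_of_le hwv with h | h
        · exact h ▸ hsucc
        · exact hcontig w hwL h
      have h1s : (w + 1) ∈ w :: w :: rest := by
        rcases htri _ h1 with h | h
        · exact h
        · omega
      have h1d : (w + 1) ∈ PySem.List.dedup (w :: w :: rest) := (PySem.List.mem_dedup _ _).mpr h1s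
      have hwd : w ∈ PySem.List.dedup (w :: w :: rest) := (PySem.List.mem_dedup _ _).mpr (by simp)
      have hlen : 2 ≤ (PySem.List.dedup (w :: w :: rest)).length :=
        pvTwo_le_length _ w (w + 1) hwd h1d (by omega)
      cases fuel with
      | zero => omega
      | succ f =>
        have hm : (w + 1) ∈ present := (PySem.Set.contains_iff _ _).mp ((hmem _).mpr h1)
        have hstep : pvWalkB present w (f + 1) = pvWalkB present (w + 1) f := by
          simp [pvWalkB, PySem.Set.contains, hm]
        have hge := pvWalk_ge present f (w + 1)
        have hscan : pvScanA (w :: w :: rest) = w + 1 := by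
          simp [pvScanA]
        omega
    · have hxltw : x < w := lt_of_le_of_ne hxw (fun h => hw h.symm)
      have hxnot : x ∉ w :: rest := fun hv => absurd (htail x hv) (by omega)
      have hcx : L.count x = 1 := by
        have := hex x le_rfl
        rw [List.count_cons_self, List.count_eq_zero.mpr hxnot] at this
        omega
      by_cases hw1 : w = x + 1
      · -- consecutive step
        have hlen : (PySem.List.dedup (x :: w :: rest)).length =
            (PySem.List.dedup (w :: rest)).length + 1 := pvDedup_cons_length x _ hxnot
        have hne : PySem.List.dedup (w :: rest) ≠ [] := by
          intro h
          have : w ∈ PySem.List.dedup (w :: rest) := (PySem.List.mem_dedup _ w).mpr (by simp)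
          rw [h] at this
          simp at this
        have hpos : 1 ≤ (PySem.List.dedup (w :: rest)).length := List.length_pos_iff.mpr hne
        cases fuel with
        | zero => omega
        | succ f =>
          have hwL : w ∈ L := by
            have := hex w (by omega)
            have hm : (0 : Nat) < (x :: w :: rest).count w := by
              simp [List.count_cons]
            exact List.count_pos_iff.mp (by omega)
          have hm : (x + 1) ∈ present := (PySem.Set.contains_iff _ _).mp ((hmem _).mpr (hw1 ▸ hwL))
          have hstep : pvWalkB present x (f + 1) = pvWalkB present (x + 1) f := by
            simp [pvWalkB, PySem.Set.contains, hm]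
          have hscan : pvScanA (x :: w :: rest) = pvScanA (w :: rest) := by
            simp [pvScanA, hw1]
          rw [hstep, hscan, ← hw1]
          refine ih w f (List.pairwise_cons.mp hpw).2 ?_ ?_ ?_ (by omega)
          · intro k hk
            have := hex k (by omega)
            have hkx : ¬ x = k := by omega
            simp [List.count_cons, hkx] at this ⊢
            omega
          · intro k hk
            rcases htri k hk with h | h
            · rcases List.mem_cons.mp h with h | h
              · right; omega
              · left; exact h
            · right; omega
          · intro k hk
            by_cases hkx : k = x
            · subst hkx; omega
            · exact hun k (by omega)
      · -- gap with a pending duplicate above is impossible under D_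
        exfalso
        have hxv : x < v := by
          rcases lt_trichotomy v x with h | h | h
          · exact absurd hc2 (by have := hun v h; omega)
          · exfalso; rw [h] at hc2; omega
          · exact h
        have hxL : x ∈ L := List.count_pos_iff.mp (by omega)
        have h1 : (x + 1) ∈ L := hcontig x hxL hxv
        rcases htri _ h1 with h | h
        · rcases List.mem_cons.mp h with h | h
          · omega
          · have := htail _ h; omega
        · omega

-- ===== VERDICT =====
theorem get_mex_spec : Claim_unchanged_get_mex := by
  intro numbers _ hne hnD
  have hsne : PySem.List.sorted numbers (fun x => x) false ≠ [] := by
    intro h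
    exact hne ((PySem.List.sorted_eq_nil_iff numbers (fun x => x) false).mp h)
  obtain ⟨v, t, hvt⟩ := List.exists_cons_of_ne_nil hsne
  have hsp : (v :: t).Perm numbers := hvt ▸ PySem.List.sorted_perm numbers (fun x => x) false
  have hvnum : v ∈ numbers := hsp.mem_iff.mp (by simp)
  simp only [get_mex, get_mex_alt, hvt]
  set present : PySem.Set Int := PySem.Set.ofList numbers with hpres
  have hmem : ∀ k, present.contains k = true ↔ k ∈ numbers := by
    intro k
    rw [PySem.Set.contains_iff, hpres, PySem.Set.mem_ofList]
  have hvpres : v ∈ present := by rw [hpres, PySem.Set.mem_ofList]; exact hvnum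
  have hmin : PySem.List.min? present (fun k => k) = some v := by
    cases hm : PySem.List.min? present (fun k => k) with
    | none =>
      exfalso
      have := (PySem.List.min?_eq_none_iff present (fun k => k)).mp hm
      rw [this] at hvpres
      simp at hvpres
    | some m =>
      have hmnum : m ∈ numbers := by
        have := PySem.List.min?_mem hm
        rw [hpres, PySem.Set.mem_ofList] at this
        exact this
      have hvm : v ≤ m := PySem.List.key_head_sorted_le numbers (fun x => x) hvt m hmnum
      have hmv : m ≤ v := PySem.List.min?_isMin hm v hvpres
      congr 1
      omega
  rw [hmin]
  by_cases hv0 : v > 0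
  · simp [hv0]
  · simp only [hv0, if_false]
    have hpw : (v :: t).Pairwise (· ≤ ·) := by
      have := PySem.List.sorted_pairwise numbers (fun x => x)
      rw [hvt] at this
      exact this
    have hfuel : (PySem.List.dedup (v :: t)).length ≤ present.length + 1 := by
      have hperm : (PySem.List.dedup (v :: t)).Perm (PySem.List.dedup numbers) := by
        refine (List.perm_ext_iff_of_nodup (PySem.List.nodup_dedup _) (PySem.List.nodup_dedup _)).mpr ?_
        intro a
        rw [PySem.List.mem_dedup, PySem.List.mem_dedup]
        exact hsp.mem_iff
      have h1 := hperm.length_eq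
      have h2 : PySem.List.dedup numbers = present := by
        rw [hpres, PySem.List.dedup_eq_ofList]
      rw [h2] at h1
      omega
    exact (pvWalk_eq_scan numbers present hmem ⟨v, hvnum, by omega⟩ hnD t v present.length hpw
      (fun k => le_of_eq (hsp.count_eq k)) (fun k hk => Or.inl (hsp.mem_iff.mpr hk))
      (by
        intro k hk hklt
        have := PySem.List.key_head_sorted_le numbers (fun x => x) hvt k hk
        simp at this
        omega)
      hfuel).symm

theorem get_mex_changed : Claim_changed_get_mex := by unfold Claim_changed_get_mex; decide

theorem get_mex_tight : Claim_exact_get_mex := by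
  intro numbers _ hne hD
  obtain ⟨⟨m, hmL, hm0⟩, v, hvL, hc2, hsucc, hcontig⟩ := hD
  have hsne : PySem.List.sorted numbers (fun x => x) false ≠ [] := by
    intro h
    exact hne ((PySem.List.sorted_eq_nil_iff numbers (fun x => x) false).mp h)
  obtain ⟨v0, t, hvt⟩ := List.exists_cons_of_ne_nil hsne
  have hsp : (v0 :: t).Perm numbers := hvt ▸ PySem.List.sorted_perm numbers (fun x => x) false
  have hv0num : v0 ∈ numbers := hsp.mem_iff.mp (by simp)
  have hv0min : ∀ k ∈ numbers, v0 ≤ k := by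
    intro k hk
    have := PySem.List.key_head_sorted_le numbers (fun x => x) hvt k hk
    simpa using this
  have hv0le : ¬ v0 > 0 := by have := hv0min m hmL; omega
  simp only [get_mex, get_mex_alt, hvt]
  set present : PySem.Set Int := PySem.Set.ofList numbers with hpres
  have hmem : ∀ k, present.contains k = true ↔ k ∈ numbers := by
    intro k
    rw [PySem.Set.contains_iff, hpres, PySem.Set.mem_ofList]
  have hvpres : v0 ∈ present := by rw [hpres, PySem.Set.mem_ofList]; exact hv0num
  have hmin : PySem.List.min? present (fun k => k) = some v0 := by
    cases hm : PySem.List.min? present (fun k => k) with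
    | none =>
      exfalso
      have := (PySem.List.min?_eq_none_iff present (fun k => k)).mp hm
      rw [this] at hvpres
      simp at hvpres
    | some m' =>
      have hmnum : m' ∈ numbers := by
        have := PySem.List.min?_mem hm
        rw [hpres, PySem.Set.mem_ofList] at this
        exact this
      have hvm : v0 ≤ m' := hv0min m' hmnum
      have hmv : m' ≤ v0 := PySem.List.min?_isMin hm v0 hvpres
      congr 1
      omega
  rw [hmin]
  simp only [hv0le, if_false]
  have hpw : (v0 :: t).Pairwise (· ≤ ·) := by
    have := PySem.List.sorted_pairwise numbers (fun x => x)
    rw [hvt] at this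
    exact this
  have hfuel : (PySem.List.dedup (v0 :: t)).length ≤ present.length + 1 := by
    have hperm : (PySem.List.dedup (v0 :: t)).Perm (PySem.List.dedup numbers) := by
      refine (List.perm_ext_iff_of_nodup (PySem.List.nodup_dedup _) (PySem.List.nodup_dedup _)).mpr ?_
      intro a
      rw [PySem.List.mem_dedup, PySem.List.mem_dedup]
      exact hsp.mem_iff
    have h1 := hperm.length_eq
    have h2 : PySem.List.dedup numbers = present := by
      rw [hpres, PySem.List.dedup_eq_ofList]
    rw [h2] at h1
    omega
  have hlt := pvScan_lt_walk numbers present hmem v hc2 hsucc hcontig t v0 present.length hpw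
    (fun k _ => hsp.count_eq k) (fun k hk => Or.inl (hsp.mem_iff.mpr hk))
    (fun k hk => by
      by_cases hkL : k ∈ numbers
      · exact absurd (hv0min k hkL) (by omega)
      · rw [List.count_eq_zero.mpr hkL]; omega)
    hfuel
  omega
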